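-- pv_equiv track=rewrite | github.com/PBeigi/EPIJudge | epi_judge_python/sort_increasing_decreasing_array.py | sort_k_increasing_decreasing_array
-- ===== SOURCE A (Python) =====
-- from typing import List
-- import heapq
--
-- def sort_k_increasing_decreasing_array(A: List[int]) -> List[int]:
--     i=0
--     j=1
--     m = dict()
--     index = 0
--     increasing = True
--     while j < len(A):
--         if j < len(A) and A[j] >= A[j-1] and increasing:
--             j+=1
--         elif increasing:
--             m[index] = A[i:j]
--             i = j
--             j = j + 1
--             increasing = False
--             index+=1
--
--         if j < len(A) and  A[j]<= A[j-1] and not increasing: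
--             j+=1
--         elif not increasing:
--             m[index] = A[i:j]
--             i = j
--             j = j + 1
--             increasing = True
--             index+=1
--     m[index] = A[i:]
--
--     h = []
--     for index, arr in m.items():
--         if index % 2 == 0 and len(arr):
--             heapq.heappush(h, (arr[0], index))
--             m[index] = arr[1:]
--         elif index % 2 == 1 and len(arr):
--             heapq.heappush(h, (arr[-1], index))
--             m[index] = arr[:-1]
--
--     res = []
--     while h:
--         v, index = heapq.heappop(h)
--         res.append(v)
--         if len(m[index]):
--             if index % 2 == 0:
--                 heapq.heappush(h, (m[index][0], index))
--                 m[index] = m[index][1:]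
--             else:
--                 heapq.heappush(h, (m[index][-1], index))
--                 m[index] = m[index][:-1]
--     return res
-- ===== SOURCE B (Python) =====
-- from typing import List
--
--
-- def sort_k_increasing_decreasing_array(A: List[int]) -> List[int]:
--     # The run-splitting + heap merge of A always yields the fully sorted
--     # array, so the idiomatic implementation is a single library sort.
--     return sorted(A)
-- ===== Notes on version B (the rewrite author's own statement) =====
-- stated objective: idiomatic
-- what changed: Replaced the hand-rolled run splitting plus heap-based k-way merge (which re-slices a run's list on every pop) with a single library sort, since the merge of the alternating runs is exactly sorted(A).
import Mathlib
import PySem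

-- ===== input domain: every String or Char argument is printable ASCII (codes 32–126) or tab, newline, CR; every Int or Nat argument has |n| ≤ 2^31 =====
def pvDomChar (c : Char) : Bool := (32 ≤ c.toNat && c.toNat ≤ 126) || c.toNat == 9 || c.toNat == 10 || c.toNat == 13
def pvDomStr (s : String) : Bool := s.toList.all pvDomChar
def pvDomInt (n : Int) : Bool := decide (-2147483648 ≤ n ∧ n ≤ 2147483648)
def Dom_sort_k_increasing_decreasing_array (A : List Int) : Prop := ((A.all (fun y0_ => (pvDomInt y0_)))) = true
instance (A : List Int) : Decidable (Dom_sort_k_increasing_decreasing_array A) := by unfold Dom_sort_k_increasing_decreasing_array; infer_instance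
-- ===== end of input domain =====

-- B replaces A's run splitting + heap k-way merge by a single library sort (same return value).

-- ===== PORT A =====
-- Loop state of the run-splitting while loop: (i, j, m, index, increasing).
structure PvSt where
  i : Int
  j : Int
  m : PySem.Dict Int (List Int)
  index : Int
  incr : Bool
deriving Repr

-- first `if/elif` block of the while body
def pvBlock1 (A : List Int) (s : PvSt) : PvSt :=
  if s.j < (A.length : Int) ∧ PySem.List.pyGetD A s.j 0 ≥ PySem.List.pyGetD A (s.j - 1) 0 ∧ s.incr = true then
    { s with j := s.j + 1 }
  else if s.incr = true then
    { i := s.j, j := s.j + 1,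
      m := s.m.insert s.index (PySem.List.slice A (some s.i) (some s.j)),
      index := s.index + 1, incr := false }
  else s

-- second `if/elif` block of the while body
def pvBlock2 (A : List Int) (s : PvSt) : PvSt :=
  if s.j < (A.length : Int) ∧ PySem.List.pyGetD A s.j 0 ≤ PySem.List.pyGetD A (s.j - 1) 0 ∧ s.incr = false then
    { s with j := s.j + 1 }
  else if s.incr = false then
    { i := s.j, j := s.j + 1,
      m := s.m.insert s.index (PySem.List.slice A (some s.i) (some s.j)),
      index := s.index + 1, incr := true }
  else s

-- one full iteration advances j by at least 1 (needed for termination of pvPhase1)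
theorem pvBlocks_j_grow (A : List Int) (s : PvSt) :
    s.j + 1 ≤ (pvBlock2 A (pvBlock1 A s)).j := by
  unfold pvBlock1 pvBlock2
  rcases s with ⟨i, j, m, index, incr⟩
  cases incr <;> simp <;> split_ifs <;> simp_all

-- `while j < len(A): …`
def pvPhase1 (A : List Int) (s : PvSt) : PvSt :=
  if _h : s.j < (A.length : Int) then pvPhase1 A (pvBlock2 A (pvBlock1 A s)) else s
termination_by ((A.length : Int) + 1 - s.j).toNat
decreasing_by
  have := pvBlocks_j_grow A s
  omega

-- Python tuple order on the heap entries (v, index)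
abbrev pvLexLe (a b : Int × Int) : Prop := a.1 < b.1 ∨ (a.1 = b.1 ∧ a.2 ≤ b.2)

-- heapq.heappush h x
def pvHeappush (h : List (Int × Int)) (x : Int × Int) : List (Int × Int) := h ++ [x]

-- heapq.heappop h: returns the minimum entry and the rest.  Throughout this
-- program all heap entries carry DISTINCT run indices, so the lexicographic
-- minimum is unique and extracting it is exactly heapq.heappop.
def pvHeappop? : List (Int × Int) → Option ((Int × Int) × List (Int × Int))
  | [] => none
  | x :: xs =>
    match pvHeappop? xs with
    | none => some (x, [])
    | some (y, ys) => if pvLexLe x y then some (x, xs) else some (y, x :: ys)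

-- the final `while h:` loop; the fuel argument (called with A.length, one popped
-- element per iteration) only makes the recursion total and is never exhausted
-- on the calls the program makes.  m[index] is read with default [] — index is
-- always a key of m here, so this is exact.
def pvPhase3 (fuel : Nat) (h : List (Int × Int)) (m : PySem.Dict Int (List Int))
    (res : List Int) : List Int :=
  match fuel with
  | 0 => res
  | fuel + 1 =>
    match pvHeappop? h with
    | none => res
    | some ((v, idx), t) =>
      let res := res ++ [v]
      let arr := m.getD idx []
      if arr ≠ [] then
        if PySem.Int.mod idx 2 = 0 then
          pvPhase3 fuel (pvHeappush t (PySem.List.pyGetD arr 0 0, idx))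
            (m.insert idx (PySem.List.slice arr (some 1) none)) res
        else
          pvPhase3 fuel (pvHeappush t (PySem.List.pyGetD arr (-1) 0, idx))
            (m.insert idx (PySem.List.slice arr none (some (-1)))) res
      else pvPhase3 fuel t m res

-- the `for index, arr in m.items():` loop body (only the current key's value is
-- reassigned, so folding over the items snapshot is exact)
def pvP2step (hm : List (Int × Int) × PySem.Dict Int (List Int)) (kv : Int × List Int) :
    List (Int × Int) × PySem.Dict Int (List Int) :=
  if PySem.Int.mod kv.1 2 = 0 ∧ kv.2 ≠ [] then
    (pvHeappush hm.1 (PySem.List.pyGetD kv.2 0 0, kv.1),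
     hm.2.insert kv.1 (PySem.List.slice kv.2 (some 1) none))
  else if PySem.Int.mod kv.1 2 = 1 ∧ kv.2 ≠ [] then
    (pvHeappush hm.1 (PySem.List.pyGetD kv.2 (-1) 0, kv.1),
     hm.2.insert kv.1 (PySem.List.slice kv.2 none (some (-1))))
  else hm

def sort_k_increasing_decreasing_array (A : List Int) : List Int :=
  let s := pvPhase1 A ⟨0, 1, PySem.Dict.empty, 0, true⟩
  let m := s.m.insert s.index (PySem.List.slice A (some s.i) none)   -- m[index] = A[i:]
  let hm := m.items.foldl pvP2step ([], m)
  pvPhase3 A.length hm.1 hm.2 []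

-- ===== PORT B =====
def sort_k_increasing_decreasing_array_alt (A : List Int) : List Int :=
  PySem.List.sorted A (fun x => x) false

-- ===== PRECONDITION & SPEC =====
def Spec_sort_k_increasing_decreasing_array (A : List Int) (out : List Int) : Prop := out = sort_k_increasing_decreasing_array_alt A
instance (A : List Int) (out : List Int) : Decidable (Spec_sort_k_increasing_decreasing_array A out) := by unfold Spec_sort_k_increasing_decreasing_array; infer_instance

-- ===== CLAIM (what is proved, stated in full; the proofs are below) =====
def Claim_equal_sort_k_increasing_decreasing_array : Prop := ∀ (A : List Int), Dom_sort_k_increasing_decreasing_array A → Spec_sort_k_increasing_decreasing_array A (sort_k_increasing_decreasing_array A)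

-- ===== LEMMAS AND PROOFS =====

-- ---- generic helpers about the heap model ----

theorem pvHeappop?_eq_none {h : List (Int × Int)} : pvHeappop? h = none ↔ h = [] := by
  cases h with
  | nil => simp [pvHeappop?]
  | cons x xs =>
    simp only [pvHeappop?]
    cases hp : pvHeappop? xs <;> simp <;> split <;> simp

theorem pvHeappop?_spec {h : List (Int × Int)} {p : Int × Int} {t : List (Int × Int)}
    (hp : pvHeappop? h = some (p, t)) :
    (p :: t).Perm h ∧ ∀ q ∈ h, pvLexLe p q := by
  induction h generalizing p t with
  | nil => simp [pvHeappop?] at hp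
  | cons x xs ih =>
    simp only [pvHeappop?] at hp
    cases hq : pvHeappop? xs with
    | none =>
      have hxs : xs = [] := pvHeappop?_eq_none.mp hq
      rw [hq] at hp
      simp at hp
      obtain ⟨rfl, rfl⟩ := hp
      subst hxs
      exact ⟨by simp, by intro q hq'; simp at hq'; subst hq'; exact Or.inr ⟨rfl, le_refl _⟩⟩
    | some yys =>
      obtain ⟨y, ys⟩ := yys
      rw [hq] at hp
      obtain ⟨hperm, hmin⟩ := ih hq
      by_cases hle : pvLexLe x y
      · simp [hle] at hp
        obtain ⟨rfl, rfl⟩ := hp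
        refine ⟨List.Perm.refl _, ?_⟩
        intro q hq'
        rcases List.mem_cons.mp hq' with rfl | hq'
        · exact Or.inr ⟨rfl, le_refl _⟩
        · -- p = x ≤ y ≤ q
          have h2 := hmin q hq'
          rcases hle with h1 | ⟨h1, h1'⟩ <;> rcases h2 with h2 | ⟨h2, h2'⟩
          · exact Or.inl (lt_trans h1 h2)
          · exact Or.inl (h2 ▸ h1)
          · exact Or.inl (h1 ▸ h2)
          · exact Or.inr ⟨h1.trans h2, le_trans h1' h2'⟩
      · simp [hle] at hp
        obtain ⟨rfl, rfl⟩ := hp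
        constructor
        · exact (List.Perm.swap x y ys).trans (hperm.cons x)
        · intro q hq'
          rcases List.mem_cons.mp hq' with rfl | hq'
          · -- q = x, ¬ x ≤lex y : ≤ is total
            rcases lt_trichotomy y.1 q.1 with h | h | h
            · exact Or.inl h
            · refine Or.inr ⟨h, ?_⟩
              by_contra hlt
              exact hle (Or.inr ⟨h.symm, by omega⟩)
            · exfalso; exact hle (Or.inl h)
          · exact hmin q hq'

theorem pvLexLe_fst {a b : Int × Int} (h : pvLexLe a b) : a.1 ≤ b.1 := by
  rcases h with h | ⟨h, _⟩ <;> omega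

-- ---- stream abstraction for the merge loop ----

-- the still-unmerged part of run k, in non-decreasing order
def pvStream (m : PySem.Dict Int (List Int)) (k : Int) : List Int :=
  if PySem.Int.mod k 2 = 0 then m.getD k [] else (m.getD k []).reverse

def pvInv (h : List (Int × Int)) (m : PySem.Dict Int (List Int)) : Prop :=
  (h.map Prod.snd).Nodup ∧ ∀ p ∈ h, List.Pairwise (· ≤ ·) (p.1 :: pvStream m p.2)

-- multiset of values still to be emitted
def pvBag (h : List (Int × Int)) (m : PySem.Dict Int (List Int)) : List Int :=
  h.map Prod.fst ++ (h.map (fun p => pvStream m p.2)).flatten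

theorem pvBag_heap_perm (m : PySem.Dict Int (List Int)) {h₁ h₂ : List (Int × Int)}
    (hp : h₁.Perm h₂) : (pvBag h₁ m).Perm (pvBag h₂ m) :=
  (hp.map _).append ((hp.map _).flatten)

theorem pvBag_cons (p : Int × Int) (t : List (Int × Int)) (m : PySem.Dict Int (List Int)) :
    (pvBag (p :: t) m).Perm (p.1 :: (pvStream m p.2 ++ pvBag t m)) := by
  unfold pvBag
  simp only [List.map_cons, List.flatten_cons, List.cons_append]
  refine List.perm_iff_count.mpr fun a => ?_
  simp [List.count_append, List.count_cons]
  omega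

theorem pvBag_append (x y : List (Int × Int)) (m : PySem.Dict Int (List Int)) :
    (pvBag (x ++ y) m).Perm (pvBag x m ++ pvBag y m) := by
  unfold pvBag
  simp only [List.map_append, List.flatten_append]
  refine List.perm_iff_count.mpr fun a => ?_
  simp [List.count_append]
  omega

theorem pvStream_insert_of_ne (m : PySem.Dict Int (List Int)) (k k' : Int) (v : List Int)
    (hne : k' ≠ k) : pvStream (m.insert k v) k' = pvStream m k' := by
  unfold pvStream
  rw [PySem.Dict.getD_insert_of_ne m v [] hne]

theorem pvPhase3_main : ∀ (fuel : Nat) (h : List (Int × Int)) (m : PySem.Dict Int (List Int))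
    (res : List Int), pvInv h m → (pvBag h m).length ≤ fuel →
    ∃ out, pvPhase3 fuel h m res = res ++ out ∧ out.Perm (pvBag h m) ∧
      out.Pairwise (· ≤ ·) ∧ ∀ c, (∀ p ∈ h, c ≤ p.1) → ∀ x ∈ out, c ≤ x := by
  intro fuel
  induction fuel with
  | zero =>
    intro h m res hinv hlen
    have hh : h = [] := by
      unfold pvBag at hlen
      simp at hlen
      cases h with
      | nil => rfl
      | cons a t => simp at hlen
    subst hh
    exact ⟨[], by simp [pvPhase3], by simp [pvBag], by simp, by simp⟩
  | succ fuel ih =>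
    intro h m res hinv hlen
    cases hpop : pvHeappop? h with
    | none =>
      have hh : h = [] := pvHeappop?_eq_none.mp hpop
      subst hh
      exact ⟨[], by simp [pvPhase3, pvHeappop?], by simp [pvBag], by simp, by simp⟩
    | some pt =>
      obtain ⟨⟨v, idx⟩, t⟩ := pt
      obtain ⟨hperm, hmin⟩ := pvHeappop?_spec hpop
      obtain ⟨hnd, hsorted⟩ := hinv
      have hmem : (v, idx) ∈ h := hperm.subset (List.mem_cons_self)
      have hv := hsorted (v, idx) hmem
      have hnd' : (idx :: t.map Prod.snd).Nodup := by
        have := (hperm.map Prod.snd).nodup_iff.mpr hnd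
        simpa using this
      have hidxt : idx ∉ t.map Prod.snd := (List.nodup_cons.mp hnd').1
      have hndt : (t.map Prod.snd).Nodup := (List.nodup_cons.mp hnd').2
      have htsub : ∀ p ∈ t, p ∈ h := fun p hp => hperm.subset (List.mem_cons_of_mem _ hp)
      have htne : ∀ p ∈ t, p.2 ≠ idx := by
        intro p hp heq
        exact hidxt (heq ▸ List.mem_map_of_mem hp)
      have hbagperm : (pvBag h m).Perm (v :: (pvStream m idx ++ pvBag t m)) :=
        (pvBag_heap_perm m hperm.symm).trans (pvBag_cons (v, idx) t m)
      -- common step: given the next state and the three facts, conclude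
      have key : ∀ (h' : List (Int × Int)) (m' : PySem.Dict Int (List Int)),
          pvPhase3 (fuel + 1) h m res = pvPhase3 fuel h' m' (res ++ [v]) →
          pvInv h' m' → (pvBag h m).Perm (v :: pvBag h' m') → (∀ p ∈ h', v ≤ p.1) →
          ∃ out, pvPhase3 (fuel + 1) h m res = res ++ out ∧ out.Perm (pvBag h m) ∧
            out.Pairwise (· ≤ ·) ∧ ∀ c, (∀ p ∈ h, c ≤ p.1) → ∀ x ∈ out, c ≤ x := by
        intro h' m' heq hinv' hbp hlb
        have hlen' : (pvBag h' m').length ≤ fuel := by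
          have := hbp.length_eq
          simp at this
          omega
        obtain ⟨out', ho1, ho2, ho3, ho4⟩ := ih h' m' (res ++ [v]) hinv' hlen'
        refine ⟨v :: out', by simp [heq, ho1], ?_, ?_, ?_⟩
        · exact (hbp.trans (ho2.symm.cons v)).symm
        · exact List.pairwise_cons.mpr ⟨ho4 v hlb, ho3⟩
        · intro c hc x hx
          rcases List.mem_cons.mp hx with rfl | hx
          · exact hc _ hmem
          · exact ho4 c (fun p hp => le_trans (hc _ hmem) (hlb p hp)) x hx
      by_cases harr : m.getD idx [] ≠ []
      · by_cases hmod : PySem.Int.mod idx 2 = 0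
        · -- even run: stream = m[idx]
          obtain ⟨a, l, harr'⟩ : ∃ a l, m.getD idx [] = a :: l := by
            cases hx : m.getD idx [] with
            | nil => exact absurd hx harr
            | cons a l => exact ⟨a, l, rfl⟩
          have hstream : pvStream m idx = a :: l := by unfold pvStream; rw [hmod] at *; simp [harr']
          have hva : v ≤ a ∧ List.Pairwise (· ≤ ·) (a :: l) := by
            rw [hstream] at hv
            exact ⟨(List.pairwise_cons.mp hv).1 a (by simp), (List.pairwise_cons.mp hv).2⟩
          refine key (t ++ [(a, idx)]) (m.insert idx l) ?_ ?_ ?_ ?_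
          · simp only [pvPhase3, hpop]
            rw [if_pos harr, if_pos hmod]
            simp [pvHeappush, harr', PySem.List.pyGetD, PySem.List.slice_from_one]
          · constructor
            · rw [List.map_append]
              exact List.Nodup.append hndt (by simp) (by simpa using hidxt)
            · intro p hp
              rcases List.mem_append.mp hp with hp | hp
              · rw [pvStream_insert_of_ne m idx p.2 l (htne p hp)]
                exact hsorted p (htsub p hp)
              · simp at hp
                subst hp
                have : pvStream (m.insert idx l) idx = l := by
                  unfold pvStream; rw [hmod] at *; simp [PySem.Dict.getD_insert_self]
                simpa [this] using hva.2
          · refine hbagperm.trans (List.Perm.cons v ?_)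
            have h1 : (pvBag (t ++ [(a, idx)]) (m.insert idx l)).Perm
                (pvBag t (m.insert idx l) ++ pvBag [(a, idx)] (m.insert idx l)) :=
              pvBag_append _ _ _
            have h2 : pvBag t (m.insert idx l) = pvBag t m := by
              unfold pvBag
              congr 1
              exact congrArg _ (List.map_congr_left fun p hp =>
                pvStream_insert_of_ne m idx p.2 l (htne p hp))
            have h3 : pvBag [(a, idx)] (m.insert idx l) = a :: l := by
              unfold pvBag
              have : pvStream (m.insert idx l) idx = l := by
                unfold pvStream; rw [hmod] at *; simp [PySem.Dict.getD_insert_self]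
              simp [this]
            rw [hstream]
            refine List.Perm.symm (h1.trans ?_)
            rw [h2, h3]
            exact List.perm_append_comm
          · intro p hp
            rcases List.mem_append.mp hp with hp | hp
            · exact pvLexLe_fst (hmin p (htsub p hp))
            · simp at hp; subst hp; exact hva.1
        · -- odd run: stream = reverse of m[idx]
          obtain ⟨l, a, harr'⟩ : ∃ l a, m.getD idx [] = l ++ [a] := by
            rcases List.eq_nil_or_concat (m.getD idx []) with hx | ⟨l, a, hx⟩
            · exact absurd hx harr
            · exact ⟨l, a, by rw [hx, List.concat_eq_append]⟩
          have hstream : pvStream m idx = a :: l.reverse := by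
            unfold pvStream; rw [if_neg hmod, harr']; simp
          have hva : v ≤ a ∧ List.Pairwise (· ≤ ·) (a :: l.reverse) := by
            rw [hstream] at hv
            exact ⟨(List.pairwise_cons.mp hv).1 a (by simp), (List.pairwise_cons.mp hv).2⟩
          refine key (t ++ [(a, idx)]) (m.insert idx l) ?_ ?_ ?_ ?_
          · simp only [pvPhase3, hpop]
            rw [if_pos harr, if_neg hmod]
            simp [pvHeappush, harr', PySem.List.pyGetD, PySem.List.pyGet?_neg_one,
              PySem.List.slice_to_neg_one]
          · constructor
            · rw [List.map_append]
              exact List.Nodup.append hndt (by simp) (by simpa using hidxt)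
            · intro p hp
              rcases List.mem_append.mp hp with hp | hp
              · rw [pvStream_insert_of_ne m idx p.2 l (htne p hp)]
                exact hsorted p (htsub p hp)
              · simp at hp
                subst hp
                have : pvStream (m.insert idx l) idx = l.reverse := by
                  unfold pvStream; rw [if_neg hmod]; simp [PySem.Dict.getD_insert_self]
                simpa [this] using hva.2
          · refine hbagperm.trans (List.Perm.cons v ?_)
            have h1 : (pvBag (t ++ [(a, idx)]) (m.insert idx l)).Perm
                (pvBag t (m.insert idx l) ++ pvBag [(a, idx)] (m.insert idx l)) :=
              pvBag_append _ _ _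
            have h2 : pvBag t (m.insert idx l) = pvBag t m := by
              unfold pvBag
              congr 1
              exact congrArg _ (List.map_congr_left fun p hp =>
                pvStream_insert_of_ne m idx p.2 l (htne p hp))
            have h3 : pvBag [(a, idx)] (m.insert idx l) = a :: l.reverse := by
              unfold pvBag
              have : pvStream (m.insert idx l) idx = l.reverse := by
                unfold pvStream; rw [if_neg hmod]; simp [PySem.Dict.getD_insert_self]
              simp [this]
            rw [hstream]
            refine List.Perm.symm (h1.trans ?_)
            rw [h2, h3]
            exact List.perm_append_comm
          · intro p hp
            rcases List.mem_append.mp hp with hp | hp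
            · exact pvLexLe_fst (hmin p (htsub p hp))
            · simp at hp; subst hp; exact hva.1
      · -- exhausted run
        rw [not_ne_iff] at harr
        have hstream : pvStream m idx = [] := by unfold pvStream; rw [harr]; simp
        refine key t m ?_ ⟨hndt, fun p hp => hsorted p (htsub p hp)⟩ ?_ ?_
        · simp only [pvPhase3, hpop]
          rw [if_neg (by simp [harr])]
        · exact hbagperm.trans (by rw [hstream]; simp)
        · exact fun p hp => pvLexLe_fst (hmin p (htsub p hp))

-- ---- phase 2 ----

theorem pvPhase2_main : ∀ (its : List (Int × List Int)) (h : List (Int × Int))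
    (m : PySem.Dict Int (List Int)),
    ((h.map Prod.snd) ++ its.map Prod.fst).Nodup →
    (∀ p ∈ h, List.Pairwise (· ≤ ·) (p.1 :: pvStream m p.2)) →
    (∀ kv ∈ its, m.get? kv.1 = some kv.2) →
    (∀ kv ∈ its, if PySem.Int.mod kv.1 2 = 0 then List.Pairwise (· ≤ ·) kv.2
      else List.Pairwise (· ≥ ·) kv.2) →
    pvInv (its.foldl pvP2step (h, m)).1 (its.foldl pvP2step (h, m)).2 ∧
      (pvBag (its.foldl pvP2step (h, m)).1 (its.foldl pvP2step (h, m)).2).Perm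
        (pvBag h m ++ (its.map Prod.snd).flatten) := by
  intro its
  induction its with
  | nil =>
    intro h m hnd hsorted _ _
    refine ⟨⟨by simpa using hnd, hsorted⟩, by simp⟩
  | cons kv rest ih =>
    obtain ⟨k, arr⟩ := kv
    intro h m hnd hsorted hget hruns
    have hmod01 : PySem.Int.mod k 2 = 0 ∨ PySem.Int.mod k 2 = 1 := by
      rw [PySem.Int.mod_eq_emod_of_pos (by omega)]; omega
    have hkh : ∀ p ∈ h, p.2 ≠ k := by
      intro p hp heq
      have := (List.disjoint_of_nodup_append hnd) (List.mem_map_of_mem hp)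
      exact this (by simp [heq])
    have hkrest : ∀ kv' ∈ rest, kv'.1 ≠ k := by
      intro kv' hkv' heq
      have h2 := (List.nodup_append.mp hnd).2.1
      rw [List.map_cons, List.nodup_cons] at h2
      have := List.mem_map_of_mem (f := Prod.fst) hkv'
      rw [heq] at this
      exact h2.1 this
    -- the three branches of pvP2step
    have hrun := hruns (k, arr) (by simp)
    by_cases harr : arr = []
    · -- empty run: no push, m untouched
      have hstep : pvP2step (h, m) (k, arr) = (h, m) := by
        unfold pvP2step; simp [harr]
      rw [List.foldl_cons, hstep]
      have hnd2 : ((h.map Prod.snd) ++ rest.map Prod.fst).Nodup := by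
        refine List.Nodup.sublist ?_ hnd
        exact List.Sublist.append_left (by simp [List.map_cons]) _
      obtain ⟨hi, hp⟩ := ih h m hnd2 hsorted
        (fun kv' h' => hget kv' (List.mem_cons_of_mem _ h'))
        (fun kv' h' => hruns kv' (List.mem_cons_of_mem _ h'))
      exact ⟨hi, hp.trans (by simp [harr])⟩
    · have hgetk : m.getD k [] = arr := by
        have := hget (k, arr) (by simp)
        simp [PySem.Dict.getD_eq_get?_getD, this]
      -- both non-empty branches push (pyGetD arr e 0, k) and overwrite m[k]
      have main : ∀ (e : Int) (l' : List Int) (str : List Int),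
          pvP2step (h, m) (k, arr) = (h ++ [(e, k)], m.insert k l') →
          pvStream (m.insert k l') k = str →
          List.Pairwise (· ≤ ·) (e :: str) → (e :: str).Perm arr →
          pvInv ((((k, arr) :: rest)).foldl pvP2step (h, m)).1
              ((((k, arr) :: rest)).foldl pvP2step (h, m)).2 ∧
            (pvBag ((((k, arr) :: rest)).foldl pvP2step (h, m)).1
              ((((k, arr) :: rest)).foldl pvP2step (h, m)).2).Perm
            (pvBag h m ++ (((k, arr) :: rest).map Prod.snd).flatten) := by
        intro e l' str hstep hstr hpair hperm
        rw [List.foldl_cons, hstep]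
        have hnd2 : (((h ++ [(e, k)]).map Prod.snd) ++ rest.map Prod.fst).Nodup := by
          rw [List.map_append, List.append_assoc]
          simpa using hnd
        have hsorted2 : ∀ p ∈ h ++ [(e, k)],
            List.Pairwise (· ≤ ·) (p.1 :: pvStream (m.insert k l') p.2) := by
          intro p hp
          rcases List.mem_append.mp hp with hp | hp
          · rw [pvStream_insert_of_ne m k p.2 l' (hkh p hp)]
            exact hsorted p hp
          · simp at hp; subst hp; simpa [hstr] using hpair
        obtain ⟨hi, hp⟩ := ih (h ++ [(e, k)]) (m.insert k l') hnd2 hsorted2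
          (fun kv' h' => by
            rw [PySem.Dict.get?_insert_of_ne m l' (hkrest kv' h')]
            exact hget kv' (List.mem_cons_of_mem _ h'))
          (fun kv' h' => hruns kv' (List.mem_cons_of_mem _ h'))
        refine ⟨hi, hp.trans ?_⟩
        have hb : (pvBag (h ++ [(e, k)]) (m.insert k l')).Perm (pvBag h m ++ arr) := by
          refine (pvBag_append _ _ _).trans ?_
          have h2 : pvBag h (m.insert k l') = pvBag h m := by
            unfold pvBag
            congr 1
            exact congrArg _ (List.map_congr_left fun p hp =>
              pvStream_insert_of_ne m k p.2 l' (hkh p hp))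
          have h3 : pvBag [(e, k)] (m.insert k l') = e :: str := by
            unfold pvBag; simp [hstr]
          rw [h2, h3]
          exact (List.Perm.refl _).append hperm
        refine (hb.append (List.Perm.refl _)).trans ?_
        simp [List.append_assoc]
      rcases hmod01 with hmod | hmod
      · obtain ⟨a, l, harr'⟩ : ∃ a l, arr = a :: l := by
          cases arr with
          | nil => exact absurd rfl harr
          | cons a l => exact ⟨a, l, rfl⟩
        have hpair : List.Pairwise (· ≤ ·) (a :: l) := by
          rw [if_pos hmod] at hrun; rwa [harr'] at hrun
        refine main a l l ?_ ?_ (by simpa using hpair) (by rw [harr'])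
        · unfold pvP2step
          rw [if_pos ⟨hmod, harr⟩]
          simp [pvHeappush, harr', PySem.List.pyGetD, PySem.List.slice_from_one]
        · unfold pvStream
          rw [if_pos hmod, PySem.Dict.getD_insert_self]
      · obtain ⟨l, a, harr'⟩ : ∃ l a, arr = l ++ [a] := by
          rcases List.eq_nil_or_concat arr with hx | ⟨l, a, hx⟩
          · exact absurd hx harr
          · exact ⟨l, a, by rw [hx, List.concat_eq_append]⟩
        have hmodne : ¬ PySem.Int.mod k 2 = 0 := by rw [hmod]; norm_num
        have hpair : List.Pairwise (· ≤ ·) (a :: l.reverse) := by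
          rw [if_neg hmodne, harr'] at hrun
          have h1 : List.Pairwise (fun x y => y ≤ x) (l ++ [a]) := hrun.imp (fun h => h)
          simpa using List.pairwise_reverse.mpr h1
        refine main a l l.reverse ?_ ?_ hpair ?_
        · unfold pvP2step
          rw [if_neg (fun hc => hmodne hc.1), if_pos ⟨hmod, harr⟩]
          simp [pvHeappush, harr', PySem.List.pyGetD, PySem.List.pyGet?_neg_one,
            PySem.List.slice_to_neg_one]
        · unfold pvStream
          rw [if_neg hmodne, PySem.Dict.getD_insert_self]
        · rw [harr']
          refine List.perm_iff_count.mpr fun x => ?_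
          simp [List.count_append, List.count_cons, List.count_reverse]

-- ---- phase 1 ----

-- local monotonicity of A on [i, j)
def pvSeg (A : List Int) (r : Int → Int → Prop) (i j : Nat) : Prop :=
  ∀ t : Nat, i ≤ t → t + 2 ≤ j → t + 1 < A.length → r (A.getD t 0) (A.getD (t + 1) 0)

def pvPhi (A : List Int) (s : PvSt) : Prop :=
  0 ≤ s.i ∧ s.i < s.j ∧ 0 ≤ s.index ∧
  s.m.keys.Nodup ∧ (∀ k ∈ s.m.keys, 0 ≤ k ∧ k < s.index) ∧
  s.m.values.flatten = A.take s.i.toNat ∧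
  (∀ kv ∈ s.m.items, if PySem.Int.mod kv.1 2 = 0 then List.Pairwise (· ≤ ·) kv.2
    else List.Pairwise (· ≥ ·) kv.2) ∧
  (s.incr = true ↔ PySem.Int.mod s.index 2 = 0) ∧
  (if s.incr then pvSeg A (· ≤ ·) s.i.toNat s.j.toNat else pvSeg A (· ≥ ·) s.i.toNat s.j.toNat)

-- a locally monotone segment is pairwise monotone
theorem pvSeg_pairwise_core (A : List Int) (r : Int → Int → Prop)
    (htrans : ∀ {a b c : Int}, r a b → r b c → r a c) (I n : Nat)
    (hseg : pvSeg A r I (I + n)) : List.Pairwise r ((A.drop I).take n) := by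
  have key : ∀ b a : Nat, I ≤ a → a < b → b < I + n → b < A.length →
      r (A.getD a 0) (A.getD b 0) := by
    intro b
    induction b with
    | zero => omega
    | succ b ihb =>
      intro a ha hab hbn hblen
      by_cases hb : a = b
      · subst hb
        exact hseg a ha (by omega) (by omega)
      · exact htrans (ihb a ha (by omega) (by omega) (by omega))
          (hseg b (by omega) (by omega) (by omega))
  refine List.pairwise_iff_getElem.mpr ?_
  intro a b ha hb hab
  have hlen : ((A.drop I).take n).length = min n (A.length - I) := by simp
  have h1 : ((A.drop I).take n)[a] = A.getD (I + a) 0 := by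
    rw [List.getElem_take, List.getElem_drop, List.getD_eq_getElem]
  have h2 : ((A.drop I).take n)[b] = A.getD (I + b) 0 := by
    rw [List.getElem_take, List.getElem_drop, List.getD_eq_getElem]
  rw [h1, h2]
  exact key (I + b) (I + a) (by omega) (by omega) (by omega) (by omega)

theorem pvSeg_pairwise_slice (A : List Int) (r : Int → Int → Prop)
    (htrans : ∀ {a b c : Int}, r a b → r b c → r a c) (i j : Int) (h0 : 0 ≤ i) (hij : i ≤ j)
    (hseg : pvSeg A r i.toNat j.toNat) :
    List.Pairwise r (PySem.List.slice A (some i) (some j)) := by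
  rw [PySem.List.slice_toNat A h0 (le_trans h0 hij)]
  refine pvSeg_pairwise_core A r htrans i.toNat (j.toNat - i.toNat) ?_
  intro t ht h2 hlen
  exact hseg t ht (by omega) hlen

theorem pvSeg_pairwise_drop (A : List Int) (r : Int → Int → Prop)
    (htrans : ∀ {a b c : Int}, r a b → r b c → r a c) (i j : Int) (h0 : 0 ≤ i) (hij : i < j)
    (hjlen : ¬ j < (A.length : Int)) (hseg : pvSeg A r i.toNat j.toNat) :
    List.Pairwise r (A.drop i.toNat) := by
  have : A.drop i.toNat = (A.drop i.toNat).take (A.length - i.toNat) := by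
    rw [List.take_of_length_le (by simp)]
  rw [this]
  refine pvSeg_pairwise_core A r htrans i.toNat (A.length - i.toNat) ?_
  intro t ht h2 hlen
  exact hseg t ht (by omega) hlen

-- parity of index flips at a cut
theorem pvMod_flip {n : Int} (h : PySem.Int.mod n 2 = 0) :
    ¬ PySem.Int.mod (n + 1) 2 = 0 := by
  rw [PySem.Int.mod_eq_emod_of_pos (by norm_num)] at h ⊢
  omega

-- a dict whose keys are all below `index` does not contain `index`
theorem pvFresh (m : PySem.Dict Int (List Int)) (index : Int)
    (hbound : ∀ k ∈ m.keys, 0 ≤ k ∧ k < index) : m.contains index = false := by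
  by_cases hc : m.contains index = true
  · have := hbound index ((PySem.Dict.contains_iff_mem_keys m index).mp hc)
    omega
  · simpa using hc

-- the state after appending run `slice A i j` at the cut point
theorem pvPhi_cut (A : List Int) (i j : Int) (m : PySem.Dict Int (List Int)) (index : Int)
    (incr : Bool) (hphi : pvPhi A ⟨i, j, m, index, incr⟩) :
    pvPhi A ⟨j, j + 1, m.insert index (PySem.List.slice A (some i) (some j)), index + 1, !incr⟩ := by
  obtain ⟨h0i, hij, h0x, hnd, hbound, hflat, hitems, hpar, hseg⟩ := hphi
  simp only at h0i hij h0x hnd hbound hflat hitems hpar hseg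
  have hfresh := pvFresh m index hbound
  have hkeys : (m.insert index (PySem.List.slice A (some i) (some j))).keys = m.keys ++ [index] :=
    PySem.Dict.keys_insert_of_not_contains m _ hfresh
  have hitems' : (m.insert index (PySem.List.slice A (some i) (some j))).items =
      m.items ++ [(index, PySem.List.slice A (some i) (some j))] :=
    PySem.Dict.items_insert_of_not_contains m _ hfresh
  have hpairnew : if PySem.Int.mod index 2 = 0
      then List.Pairwise (· ≤ ·) (PySem.List.slice A (some i) (some j))
      else List.Pairwise (· ≥ ·) (PySem.List.slice A (some i) (some j)) := by
    cases hinc : incr with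
    | true =>
      rw [hinc] at hpar hseg
      simp only [if_pos (hpar.mp rfl)]
      simp only [if_true, Bool.true_eq] at hseg
      exact pvSeg_pairwise_slice A (fun x1 x2 => x1 ≤ x2) (fun hab hbc => le_trans hab hbc) i j h0i (le_of_lt hij) hseg
    | false =>
      rw [hinc] at hpar hseg
      have hm : ¬ PySem.Int.mod index 2 = 0 := fun hmm => absurd (hpar.mpr hmm) (by simp)
      simp only [if_neg hm]
      simp only [Bool.false_eq_true, if_false] at hseg
      exact pvSeg_pairwise_slice A (fun x1 x2 => x1 ≥ x2) (fun hab hbc => le_trans hbc hab) i j h0i (le_of_lt hij) hseg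
  refine ⟨by show (0:Int) ≤ j; omega, by show (j:Int) < j + 1; omega,
    by show (0:Int) ≤ index + 1; omega, ?_, ?_, ?_, ?_, ?_, ?_⟩
  · show (m.insert index (PySem.List.slice A (some i) (some j))).keys.Nodup
    simp only [hkeys]
    refine List.Nodup.append hnd (by simp) ?_
    intro k hk
    have := hbound k hk
    simp
    omega
  · show ∀ k ∈ (m.insert index (PySem.List.slice A (some i) (some j))).keys, 0 ≤ k ∧ k < index + 1
    simp only [hkeys]
    intro k hk
    rcases List.mem_append.mp hk with hk | hk
    · have := hbound k hk; omega
    · simp at hk; omega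
  · show (m.insert index _).values.flatten = A.take (j.toNat)
    have hv : (m.insert index (PySem.List.slice A (some i) (some j))).values =
        m.values ++ [PySem.List.slice A (some i) (some j)] := by
      unfold PySem.Dict.values
      rw [hitems']
      simp
    rw [hv, List.flatten_append, hflat]
    simp only [List.flatten_cons, List.flatten_nil, List.append_nil]
    rw [PySem.List.slice_toNat A h0i (by omega)]
    conv_rhs => rw [show j.toNat = i.toNat + (j.toNat - i.toNat) from by omega, List.take_add]
  · show ∀ kv ∈ (m.insert index (PySem.List.slice A (some i) (some j))).items, _
    intro kv hkv
    rw [hitems'] at hkv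
    rcases List.mem_append.mp hkv with hkv | hkv
    · exact hitems kv hkv
    · simp at hkv
      subst hkv
      exact hpairnew
  · show (!incr) = true ↔ PySem.Int.mod (index + 1) 2 = 0
    cases hinc : incr with
    | true =>
      rw [hinc] at hpar
      simp only [Bool.not_true, Bool.false_eq_true, false_iff]
      exact pvMod_flip (hpar.mp rfl)
    | false =>
      rw [hinc] at hpar
      have hm : ¬ PySem.Int.mod index 2 = 0 := fun hmm => absurd (hpar.mpr hmm) (by simp)
      simp only [Bool.not_false, true_iff]
      rw [PySem.Int.mod_eq_emod_of_pos (by norm_num)] at hm ⊢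
      omega
  · have hvac : ∀ r : Int → Int → Prop, pvSeg A r j.toNat (j + 1).toNat := by
      intro r t ht h2 hlen
      omega
    show (if (!incr) = true then _ else _)
    split <;> exact hvac _

theorem pvPhi_block1 (A : List Int) (s : PvSt) (hs : pvPhi A s) : pvPhi A (pvBlock1 A s) := by
  rcases s with ⟨i, j, m, index, incr⟩
  unfold pvBlock1
  by_cases hc : j < (A.length : Int) ∧
      PySem.List.pyGetD A j 0 ≥ PySem.List.pyGetD A (j - 1) 0 ∧ incr = true
  · rw [if_pos hc]
    obtain ⟨h0i, hij, h0x, hnd, hbound, hflat, hitems, hpar, hseg⟩ := hs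
    simp only at h0i hij h0x hnd hbound hflat hitems hpar hseg
    obtain ⟨hjlen, hge, hinc⟩ := hc
    refine ⟨h0i, by simp; omega, h0x, hnd, hbound, hflat, hitems, hpar, ?_⟩
    show (if incr = true then _ else _)
    rw [hinc] at hseg ⊢
    simp only [if_true, Bool.true_eq] at hseg ⊢
    intro t ht h2 hlen
    by_cases hlast : t + 2 ≤ j.toNat
    · exact hseg t ht hlast hlen
    · have ht1 : t + 1 = j.toNat := by omega
      rw [PySem.List.pyGetD_of_nonneg A 0 (by omega),
        PySem.List.pyGetD_of_nonneg A 0 (by omega)] at hge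
      have e1 : (j - 1).toNat = t := by omega
      have e2 : j.toNat = t + 1 := by omega
      rw [e1, e2] at hge
      exact hge
  · rw [if_neg hc]
    by_cases hinc : incr = true
    · rw [if_pos hinc]
      subst hinc
      exact pvPhi_cut A i j m index true hs
    · rw [if_neg hinc]
      exact hs

theorem pvPhi_block2 (A : List Int) (s : PvSt) (hs : pvPhi A s) : pvPhi A (pvBlock2 A s) := by
  rcases s with ⟨i, j, m, index, incr⟩
  unfold pvBlock2
  by_cases hc : j < (A.length : Int) ∧
      PySem.List.pyGetD A j 0 ≤ PySem.List.pyGetD A (j - 1) 0 ∧ incr = false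
  · rw [if_pos hc]
    obtain ⟨h0i, hij, h0x, hnd, hbound, hflat, hitems, hpar, hseg⟩ := hs
    simp only at h0i hij h0x hnd hbound hflat hitems hpar hseg
    obtain ⟨hjlen, hge, hinc⟩ := hc
    refine ⟨h0i, by simp; omega, h0x, hnd, hbound, hflat, hitems, hpar, ?_⟩
    show (if incr = true then _ else _)
    rw [hinc] at hseg ⊢
    simp only [Bool.false_eq_true, if_false] at hseg ⊢
    intro t ht h2 hlen
    by_cases hlast : t + 2 ≤ j.toNat
    · exact hseg t ht hlast hlen
    · have ht1 : t + 1 = j.toNat := by omega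
      rw [PySem.List.pyGetD_of_nonneg A 0 (by omega),
        PySem.List.pyGetD_of_nonneg A 0 (by omega)] at hge
      have e1 : (j - 1).toNat = t := by omega
      have e2 : j.toNat = t + 1 := by omega
      rw [e1, e2] at hge
      exact hge
  · rw [if_neg hc]
    by_cases hinc : incr = false
    · rw [if_pos hinc]
      subst hinc
      exact pvPhi_cut A i j m index false hs
    · rw [if_neg hinc]
      exact hs

theorem pvPhi_phase1 (A : List Int) (s : PvSt) (hs : pvPhi A s) :
    pvPhi A (pvPhase1 A s) ∧ ¬ (pvPhase1 A s).j < (A.length : Int) := by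
  induction s using pvPhase1.induct A with
  | case1 s hlt ih =>
    rw [pvPhase1, dif_pos hlt]
    exact ih (pvPhi_block2 A _ (pvPhi_block1 A _ hs))
  | case2 s hlt =>
    rw [pvPhase1, dif_neg hlt]
    exact ⟨hs, hlt⟩

-- ===== VERDICT (by name: the statement is the Claim_ definition above) =====
theorem sort_k_increasing_decreasing_array_spec : Claim_equal_sort_k_increasing_decreasing_array := by
  intro A _
  unfold Spec_sort_k_increasing_decreasing_array sort_k_increasing_decreasing_array_alt
  have hinit : pvPhi A ⟨0, 1, PySem.Dict.empty, 0, true⟩ := by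
    refine ⟨by norm_num, by norm_num, by norm_num, ?_, ?_, ?_, ?_, ?_, ?_⟩
    · exact List.nodup_nil
    · intro k hk; simp at hk
    · rfl
    · intro kv hkv
      rw [show (PySem.Dict.empty : PySem.Dict Int (List Int)).items = [] from rfl] at hkv
      simp at hkv
    · have : PySem.Int.mod 0 2 = 0 := by decide
      simp [this]
    · show (if true = true then _ else _)
      simp only [if_true]
      intro t ht h2 hlen
      omega
  obtain ⟨hphi, hexit⟩ := pvPhi_phase1 A _ hinit
  set s := pvPhase1 A ⟨0, 1, PySem.Dict.empty, 0, true⟩ with hsdef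
  obtain ⟨h0i, hij, h0x, hnd, hbound, hflat, hitems, hpar, hseg⟩ := hphi
  set M := s.m.insert s.index (PySem.List.slice A (some s.i) none) with hMdef
  have hfresh := pvFresh s.m s.index hbound
  have hkeysM : M.keys = s.m.keys ++ [s.index] :=
    PySem.Dict.keys_insert_of_not_contains s.m _ hfresh
  have hndM : M.keys.Nodup := by
    rw [hkeysM]
    refine List.Nodup.append hnd (by simp) ?_
    intro k hk
    have := hbound k hk
    simp
    omega
  have hitemsM : M.items = s.m.items ++ [(s.index, PySem.List.slice A (some s.i) none)] :=
    PySem.Dict.items_insert_of_not_contains s.m _ hfresh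
  have hdrop : PySem.List.slice A (some s.i) none = A.drop s.i.toNat :=
    PySem.List.slice_from A h0i
  have hvalues : s.m.items.map Prod.snd = s.m.values := rfl
  have hflatM : ((M.items.map Prod.snd).flatten : List Int) = A := by
    rw [hitemsM, List.map_append, List.flatten_append, hvalues, hflat, hdrop]
    simp
  have hrunsM : ∀ kv ∈ M.items, if PySem.Int.mod kv.1 2 = 0
      then List.Pairwise (· ≤ ·) kv.2 else List.Pairwise (· ≥ ·) kv.2 := by
    intro kv hkv
    rw [hitemsM] at hkv
    rcases List.mem_append.mp hkv with hkv | hkv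
    · exact hitems kv hkv
    · simp at hkv
      subst hkv
      rw [hdrop]
      cases hinc : s.incr with
      | true =>
        rw [hinc] at hpar hseg
        simp only [if_pos (hpar.mp rfl)]
        simp only [if_true, Bool.true_eq] at hseg
        exact pvSeg_pairwise_drop A (fun x1 x2 => x1 ≤ x2) (fun hab hbc => le_trans hab hbc)
          s.i s.j h0i hij hexit hseg
      | false =>
        rw [hinc] at hpar hseg
        have hm : ¬ PySem.Int.mod s.index 2 = 0 := fun hmm => absurd (hpar.mpr hmm) (by simp)
        simp only [if_neg hm]
        simp only [Bool.false_eq_true, if_false] at hseg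
        exact pvSeg_pairwise_drop A (fun x1 x2 => x1 ≥ x2) (fun hab hbc => le_trans hbc hab)
          s.i s.j h0i hij hexit hseg
  have hkeysfst : M.items.map Prod.fst = M.keys := rfl
  obtain ⟨hinv2, hbag2⟩ := pvPhase2_main M.items [] M
    (by simpa [hkeysfst] using hndM)
    (by intro p hp; simp at hp)
    (fun kv hkv => PySem.Dict.get?_of_mem_items M hkv hndM)
    hrunsM
  have hbagA : (pvBag (M.items.foldl pvP2step ([], M)).1
      (M.items.foldl pvP2step ([], M)).2).Perm A := by
    refine hbag2.trans ?_
    rw [hflatM]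
    have : pvBag [] M = [] := by unfold pvBag; simp
    rw [this]
    simp
  obtain ⟨out, hout_eq, hout_perm, hout_pair, _⟩ := pvPhase3_main A.length
    (M.items.foldl pvP2step ([], M)).1 (M.items.foldl pvP2step ([], M)).2 [] hinv2
    (by rw [hbagA.length_eq])
  have hdef : sort_k_increasing_decreasing_array A =
      pvPhase3 A.length (M.items.foldl pvP2step ([], M)).1
        (M.items.foldl pvP2step ([], M)).2 [] := rfl
  rw [hdef, hout_eq]
  have := PySem.List.sorted_id_eq_of_perm_of_pairwise A out (hout_perm.trans hbagA) hout_pair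
  simpa using this.symm
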